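-- pv_equiv track=rewrite | github.com/rudolfbyker/coderev | codediff.py | strip_prefix
-- ===== SOURCE A (Python) =====
-- def strip_prefix(name, p=0):
--     """
--     strip NUM slashes, like patch(1) -pNUM
--     eg1: /foo/bar/a/b/x.c
--     -p0 gives orignal name (no change)
--     -p1 gives foo/bar/a/b/x.c
--     -p2 gives bar/a/b/x.c
--     -p9 gives x.c
--
--     eg2: foo/bar/a/b/x.c
--     -p0 gives orignal name (no change)
--     -p1 gives bar/a/b/x.c
--     -p2 gives a/b/x.c
--     -p9 gives x.c
--
--     eg3: ./foo/bar/a/b/x.c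
--     -p0 gives orignal name (no change)
--     -p1 gives foo/bar/a/b/x.c
--     -p2 gives bar/a/b/x.c
--     -p9 gives x.c
--     """
--     cur = 0
--     tail = len(name) - 1
--     while p > 0:
--         index = name.find('/', cur)
--         # print 'p:', p, 'cur:', cur, 'index:', index
--         if index == -1:
--             break
--         while index <= tail and name[index] == '/':
--             index += 1
--         cur = index
--         p -= 1
--     return name[cur:]
-- ===== SOURCE B (Python) =====
-- def strip_prefix(name, p=0):
--     """strip NUM leading path components, like patch(1) -pNUM."""
--     rest = name
--     while p > 0:
--         head, slash, tail = rest.partition('/')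
--         if not slash:
--             break
--         rest = tail.lstrip('/')
--         p -= 1
--     return rest
-- ===== Notes on version B (the rewrite author's own statement) =====
-- stated objective: idiomatic
-- what changed: Replaces A's index arithmetic (cur/tail, find with a start offset, and an inner character-bumping while loop) by repeatedly partitioning off the leading component and lstripping the slash run from a shrinking remainder string, returning the remainder itself instead of slicing the original.
import Mathlib
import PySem

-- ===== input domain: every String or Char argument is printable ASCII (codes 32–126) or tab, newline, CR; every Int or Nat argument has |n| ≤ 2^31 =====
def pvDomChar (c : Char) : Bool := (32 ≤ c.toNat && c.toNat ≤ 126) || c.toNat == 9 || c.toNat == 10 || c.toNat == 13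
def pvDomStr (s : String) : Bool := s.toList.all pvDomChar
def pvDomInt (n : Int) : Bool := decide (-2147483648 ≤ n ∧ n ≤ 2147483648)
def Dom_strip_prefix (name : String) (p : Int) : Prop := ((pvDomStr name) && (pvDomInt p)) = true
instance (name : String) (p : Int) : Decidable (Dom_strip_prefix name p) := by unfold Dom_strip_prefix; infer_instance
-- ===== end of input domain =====

-- B replaces A's index/find/inner-while bookkeeping by repeatedly partitioning off one leading
-- component and lstripping the slash run from a shrinking remainder string (idiomatic; same cost).

-- ===== PORT A =====
-- inner while loop: 'while index <= tail and name[index] == "/": index += 1'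
def stripInner (s : List Char) (tail : Int) (index : Int) : Int :=
  if _h : index ≤ tail ∧ PySem.List.pyGet? s index = some '/' then
    stripInner s tail (index + 1)
  else index
termination_by (tail + 1 - index).toNat
decreasing_by omega

-- outer while loop: 'while p > 0: index = name.find("/", cur); if index == -1: break; …'
def stripOuter (s : List Char) (tail : Int) (cur : Int) (p : Int) : Int :=
  if _h : p > 0 then
    let index := PySem.Chars.findFrom s ['/'] cur none
    if index = -1 then cur
    else stripOuter s tail (stripInner s tail index) (p - 1)
  else cur
termination_by p.toNat
decreasing_by omega

def strip_prefix (name : String) (p : Int) : String :=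
  let cur := stripOuter name.toList ((name.toList.length : Int) - 1) 0 p
  PySem.Str.slice name (some cur) none

-- ===== PORT B =====
-- 'rest.partition("/")': the part from the first '/' on is rest.dropWhile (≠ '/'); it is empty
-- exactly when no separator was found (the break).  'tail.lstrip("/")' = dropWhile (= '/')
-- (exact: lstrip with the explicit char set "/").
def altStrip (rest : List Char) (p : Int) : List Char :=
  if _h : p > 0 then
    match rest.dropWhile (· != '/') with
    | [] => rest
    | _ :: tail => altStrip (tail.dropWhile (· == '/')) (p - 1)
  else rest
termination_by p.toNat
decreasing_by omega

def strip_prefix_alt (name : String) (p : Int) : String :=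
  String.ofList (altStrip name.toList p)

-- ===== PRECONDITION & SPEC =====
def Spec_strip_prefix (name : String) (p : Int) (out : String) : Prop := out = strip_prefix_alt name p
instance (name : String) (p : Int) (out : String) : Decidable (Spec_strip_prefix name p out) := by unfold Spec_strip_prefix; infer_instance

-- ===== CLAIM (what is proved, stated in full; the proofs are below) =====
def Claim_equal_strip_prefix : Prop := ∀ (name : String) (p : Int), Dom_strip_prefix name p → Spec_strip_prefix name p (strip_prefix name p)

-- ===== LEMMAS AND PROOFS =====

theorem dropWhile_ne_eq_nil (t : List Char) (h : '/' ∉ t) : t.dropWhile (· != '/') = [] := by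
  rw [List.dropWhile_eq_nil_iff]
  intro x hx
  simp only [bne_iff_ne, ne_eq]
  exact fun hc => h (hc ▸ hx)

theorem dropWhile_ne_of_first (t : List Char) (j : Nat)
    (hpref : ['/'] <+: t.drop j) (hmin : ∀ i, i < j → ¬ ['/'] <+: t.drop i) :
    t.dropWhile (· != '/') = t.drop j := by
  induction t generalizing j with
  | nil => simp at hpref
  | cons c t ih =>
    cases j with
    | zero =>
      obtain ⟨hc, -⟩ := List.cons_prefix_cons.mp hpref
      simp [← hc]
    | succ j =>
      have hc : c ≠ '/' := by
        intro hc
        exact hmin 0 (Nat.succ_pos j) (by simp [List.cons_prefix_cons, hc])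
      rw [List.drop_succ_cons] at hpref ⊢
      rw [List.dropWhile_cons]
      simp only [bne_iff_ne, ne_eq, hc, not_false_eq_true, if_true]
      exact ih j hpref (fun i hi => by simpa using hmin (i+1) (by omega))

theorem stripInner_spec (s : List Char) : ∀ (n i : Nat), s.length - i = n → i ≤ s.length →
    ∃ k : Nat, stripInner s ((s.length : Int) - 1) i = (k : Int) ∧ k ≤ s.length ∧
      s.drop k = (s.drop i).dropWhile (· == '/') := by
  intro n
  induction n with
  | zero =>
    intro i hni hi
    have hi' : i = s.length := by omega
    refine ⟨i, ?_, hi, by simp [hi']⟩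
    rw [stripInner, dif_neg]
    rintro ⟨h1, -⟩
    omega
  | succ n ih =>
    intro i hni hi
    have hlt : i < s.length := by omega
    have hdrop : s.drop i = s[i] :: s.drop (i+1) := List.drop_eq_getElem_cons hlt
    have hget : PySem.List.pyGet? s (i : Int) = some s[i] := by
      simp [hlt]
    by_cases hc : s[i] = '/'
    · rw [stripInner, dif_pos ⟨by omega, by rw [hget, hc]⟩]
      obtain ⟨k, hk, hkle, hk2⟩ := ih (i+1) (by omega) (by omega)
      refine ⟨k, by exact_mod_cast hk, hkle, ?_⟩
      rw [hdrop, List.dropWhile_cons]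
      simp [hc, hk2]
    · refine ⟨i, ?_, hi, ?_⟩
      · rw [stripInner, dif_neg]
        rintro ⟨-, h2⟩
        rw [hget] at h2
        exact hc (by simpa using h2)
      · rw [hdrop, List.dropWhile_cons]
        simp [hc, ← hdrop]

theorem stripOuter_spec : ∀ (n : Nat) (p : Int), p.toNat = n → ∀ (s : List Char) (cur : Nat),
    cur ≤ s.length →
    ∃ k : Nat, stripOuter s ((s.length : Int) - 1) cur p = (k : Int) ∧ k ≤ s.length ∧
      s.drop k = altStrip (s.drop cur) p := by
  intro n
  induction n using Nat.strong_induction_on with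
  | _ n ih =>
    intro p hpn s cur hcur
    by_cases hp : p > 0
    · rw [stripOuter, dif_pos hp]
      rw [altStrip, dif_pos hp]
      simp only
      set t := s.drop cur with ht
      have hff : PySem.Chars.findFrom s ['/'] (cur : Int) none =
          if PySem.Chars.find t ['/'] = -1 then -1 else (cur : Int) + PySem.Chars.find t ['/'] :=
        PySem.Chars.findFrom_natCast s ['/'] cur hcur
      by_cases hf : PySem.Chars.find t ['/'] = -1
      · -- no '/' in the remainder: both sides stop
        have hnot : '/' ∉ t := by
          have := (PySem.Chars.find_eq_neg_one_iff t ['/']).mp hf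
          exact fun hm => this ((List.singleton_infix_iff '/' t).mpr hm)
        rw [hff, if_pos hf, if_pos rfl]
        rw [dropWhile_ne_eq_nil t hnot]
        exact ⟨cur, rfl, hcur, rfl⟩
      · -- found at j
        have h0 : (0:Int) ≤ PySem.Chars.find t ['/'] := by
          have := PySem.Chars.neg_one_le_find t ['/']
          omega
        set j : Nat := (PySem.Chars.find t ['/']).toNat with hj
        obtain ⟨hpref, hmin⟩ := PySem.Chars.find_spec h0
        have hfj : PySem.Chars.find t ['/'] = (j : Int) := (Int.toNat_of_nonneg h0).symm
        have hjlt : j < t.length := by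
          have h1 : (['/'] : List Char).length ≤ (t.drop j).length := hpref.length_le
          simp only [List.length_cons, List.length_nil, List.length_drop] at h1
          omega
        have hdw : t.dropWhile (· != '/') = t.drop j := dropWhile_ne_of_first t j hpref hmin
        have hdj : t.drop j = s.drop (cur + j) := by
          rw [ht, List.drop_drop]
        have hcj : cur + j < s.length := by
          have htlen : t.length = s.length - cur := by simp [ht]
          omega
        have hhd : s.drop (cur + j) = s[cur + j] :: s.drop (cur + j + 1) :=
          List.drop_eq_getElem_cons hcj
        have hslash : s[cur + j] = '/' := by
          have h2 : ['/'] <+: s[cur + j] :: s.drop (cur + j + 1) := by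
            rw [← hhd, ← hdj]; exact hpref
          exact (List.cons_prefix_cons.mp h2).1.symm
        -- A side: index = cur + j
        have hidx : PySem.Chars.findFrom s ['/'] (cur : Int) none = ((cur + j : Nat) : Int) := by
          rw [hff, if_neg hf, hfj]
          push_cast
          ring
        rw [hidx, if_neg (by push_cast; omega)]
        -- inner loop from cur + j
        obtain ⟨k₁, hk₁, hk₁le, hk₁drop⟩ :=
          stripInner_spec s (s.length - (cur + j)) (cur + j) rfl (by omega)
        rw [hk₁]
        -- B side: match arm
        rw [hdw, hdj, hhd]
        have hnext : s.drop k₁ = (s.drop (cur + j + 1)).dropWhile (· == '/') := by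
          rw [hk₁drop, hhd, List.dropWhile_cons]
          simp [hslash]
        obtain ⟨k, hk, hkle, hkdrop⟩ := ih (p - 1).toNat (by omega) (p - 1) rfl s k₁ hk₁le
        exact ⟨k, hk, hkle, by rw [hkdrop, hnext]⟩
    · rw [stripOuter, dif_neg hp, altStrip, dif_neg hp]
      exact ⟨cur, rfl, hcur, rfl⟩

-- ===== VERDICT (by name: the statement is the Claim_ definition above) =====
theorem strip_prefix_spec : Claim_equal_strip_prefix := by
  intro name p _
  unfold Spec_strip_prefix strip_prefix strip_prefix_alt
  obtain ⟨k, hk, hkle, hdrop⟩ := stripOuter_spec p.toNat p rfl name.toList 0 (Nat.zero_le _)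
  have hk' : stripOuter name.toList ((name.toList.length : Int) - 1) 0 p = (k : Int) := by
    exact_mod_cast hk
  show PySem.Str.slice name (some (stripOuter name.toList ((name.toList.length : Int) - 1) 0 p)) none
      = String.ofList (altStrip name.toList p)
  rw [hk']
  apply String.toList_inj.mp
  have h2 : altStrip name.toList p = name.toList.drop k := by simpa using hdrop.symm
  simp [PySem.List.slice_from_natCast, h2]
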